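-- pv_equiv track=rewrite | github.com/aditya-2703/DSA | ARRAY/FIND_TRANSITION_POINT.PY | method_1
-- ===== SOURCE A (Python) =====
-- def method_1(arr):
--     result=-1
--     for i in range(len(arr)):
--         if arr[i]==1:
--             result=i
--             break
--         else:
--             continue
--     return result
-- ===== SOURCE B (Python) =====
-- def method_1(arr):
--     # Right-to-left sweep: overwrite result at every 1; the last overwrite
--     # (the leftmost 1) wins. No early exit, opposite traversal order to A.
--     result = -1
--     i = len(arr) - 1
--     while i >= 0:
--         if arr[i] == 1:
--             result = i
--         i -= 1
--     return result
-- ===== Notes on version B (the rewrite author's own statement) =====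
-- stated objective: alternative
-- what changed: Replaces A's forward scan with early break by a backward right-to-left sweep that overwrites the accumulator at every 1, so the final overwrite is the first index; correctness rests on the traversal-order argument that the last write in a descending sweep is the minimal index.
import Mathlib
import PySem

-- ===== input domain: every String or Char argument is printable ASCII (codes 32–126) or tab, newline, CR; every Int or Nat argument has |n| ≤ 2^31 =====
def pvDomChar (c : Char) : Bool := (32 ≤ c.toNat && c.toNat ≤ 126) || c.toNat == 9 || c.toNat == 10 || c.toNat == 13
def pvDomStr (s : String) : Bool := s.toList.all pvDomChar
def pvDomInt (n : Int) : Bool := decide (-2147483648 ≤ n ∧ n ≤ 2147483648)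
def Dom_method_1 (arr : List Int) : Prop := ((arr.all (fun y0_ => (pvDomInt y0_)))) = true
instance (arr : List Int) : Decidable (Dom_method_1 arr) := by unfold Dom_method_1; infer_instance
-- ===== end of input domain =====

-- B replaces A's forward scan with early break by a backward sweep whose accumulator
-- is overwritten at every 1, so the last overwrite (the leftmost 1) wins (alternative).

-- ===== PORT A =====
-- A: result = -1; for i in range(len(arr)): if arr[i]==1: result=i; break; return result
def method_1Loop (arr : List Int) : List Int → Int → Int
  | [], result => result
  | i :: rest, result =>
    if PySem.List.pyGetD arr i 0 = 1 then i   -- result = i; break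
    else method_1Loop arr rest result

def method_1 (arr : List Int) : Int :=
  method_1Loop arr (PySem.List.pyRange 0 (PySem.List.len arr) 1) (-1)

-- ===== PORT B =====
-- B: result=-1; i=len(arr)-1; while i>=0: if arr[i]==1: result=i; i-=1; return result
-- fuel n stands for the remaining indices n-1, n-2, …, 0 (i = n-1)
def method_1AltLoop (arr : List Int) : Nat → Int → Int
  | 0, result => result
  | n + 1, result =>
    method_1AltLoop arr n (if PySem.List.pyGetD arr (n : Int) 0 = 1 then (n : Int) else result)

def method_1_alt (arr : List Int) : Int :=
  method_1AltLoop arr arr.length (-1)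

-- ===== PRECONDITION & SPEC =====
def Spec_method_1 (arr : List Int) (out : Int) : Prop := out = method_1_alt arr
instance (arr : List Int) (out : Int) : Decidable (Spec_method_1 arr out) := by unfold Spec_method_1; infer_instance

-- ===== CLAIM (what is proved, stated in full; the proofs are below) =====
def Claim_equal_method_1 : Prop := ∀ (arr : List Int), Dom_method_1 arr → Spec_method_1 arr (method_1 arr)

-- ===== LEMMAS AND PROOFS =====

-- A's loop computes the first index of 1 (shifted by the already-consumed prefix)
theorem method_1Loop_eq (suf pre : List Int) :
    method_1Loop (pre ++ suf)
      (PySem.List.pyRange (pre.length : Int) ((pre.length : Int) + (suf.length : Int)) 1) (-1) =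
    match PySem.List.index? suf 1 with
    | some i => (pre.length : Int) + (i : Int)
    | none => -1 := by
  induction suf generalizing pre with
  | nil =>
    rw [PySem.List.pyRange_one_eq_nil (by simp)]
    simp [method_1Loop, PySem.List.index?]
  | cons x rest ih =>
    rw [PySem.List.pyRange_one_cons (by push_cast [List.length_cons]; omega)]
    have hget : PySem.List.pyGetD (pre ++ x :: rest) (pre.length : Int) 0 = x := by
      rw [PySem.List.pyGetD_natCast]
      simp [List.getD]
    by_cases hx : x = 1
    · subst hx
      rw [PySem.List.index?_cons_self]
      simp [method_1Loop, hget]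
    · have h1 : PySem.List.index? (x :: rest) 1 = (PySem.List.index? rest 1).map (· + 1) :=
        PySem.List.index?_cons_of_ne rest hx
      have h2 := ih (pre ++ [x])
      simp only [List.append_assoc, List.singleton_append, List.length_append,
        List.length_singleton] at h2
      simp only [method_1Loop, hget, if_neg hx, h1]
      push_cast [List.length_cons] at h2 ⊢
      rw [show ((pre.length : Int) + ((rest.length : Int) + 1)) =
          (pre.length : Int) + 1 + (rest.length : Int) by ring]
      rw [h2]
      cases PySem.List.index? rest 1 with
      | none => simp
      | some i => simp; ring

-- B's backward sweep over the first n indices computes the first index of 1 in arr.take n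
theorem method_1AltLoop_eq (arr : List Int) (n : Nat) (hn : n ≤ arr.length) (r : Int) :
    method_1AltLoop arr n r =
    match PySem.List.index? (arr.take n) 1 with
    | some i => (i : Int)
    | none => r := by
  induction n generalizing r with
  | zero => simp [method_1AltLoop, PySem.List.index?]
  | succ n ih =>
    have hlt : n < arr.length := hn
    have hget : PySem.List.pyGetD arr (n : Int) 0 = arr[n] := by
      rw [PySem.List.pyGetD_natCast]
      simp [List.getD, hlt]
    have htake : arr.take (n + 1) = arr.take n ++ [arr[n]] := by
      rw [List.take_add_one]
      simp [List.getElem?_eq_getElem hlt]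
    rw [method_1AltLoop, hget, ih (Nat.le_of_lt hlt), htake]
    by_cases hmem : (1 : Int) ∈ arr.take n
    · rw [PySem.List.index?_append_of_mem _ hmem]
      rcases Option.isSome_iff_exists.mp
        ((PySem.List.index?_isSome_iff (arr.take n) 1).mpr hmem) with ⟨i, hi⟩
      rw [hi]
    · have hnone : PySem.List.index? (arr.take n) 1 = none :=
        (PySem.List.index?_eq_none_iff _ _).mpr hmem
      rw [hnone]
      by_cases hx : arr[n] = (1 : Int)
      · rw [if_pos hx, hx, PySem.List.index?_append_singleton_self _ _ hmem]
        simp [List.length_take, Nat.min_eq_left (Nat.le_of_lt hlt)]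
      · have : PySem.List.index? (arr.take n ++ [arr[n]]) 1 = none := by
          rw [PySem.List.index?_eq_none_iff]
          intro h
          rcases List.mem_append.mp h with h | h
          · exact hmem h
          · simp at h
            exact hx h.symm
        rw [this, if_neg hx]

-- ===== VERDICT (by name: the statement is the Claim_ definition above) =====
theorem method_1_spec : Claim_equal_method_1 := by
  intro arr _
  unfold Spec_method_1 method_1 method_1_alt
  have hA := method_1Loop_eq arr []
  simp only [List.nil_append, List.length_nil, Nat.cast_zero, zero_add] at hA
  have hB := method_1AltLoop_eq arr arr.length le_rfl (-1)
  simp only [List.take_length] at hB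
  rw [PySem.List.len_eq, hA, hB]
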